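-- pv_equiv track=rewrite | github.com/gdderije/CWS-DTSA | CWS-DTSA.py | two_opt_swap
-- ===== SOURCE A (Python) =====
-- def two_opt_swap(subroute1, subroute2):
--     for i in range(len(subroute1)):
--         for j in range(len(subroute2)):
--             if i == 0 and j == 0:
--                 continue
--             new_subroute1 = subroute1[:i] + subroute2[j:]
--             new_subroute2 = subroute2[:j] + subroute1[i:]
--             if is_feasible(new_subroute1) and is_feasible(new_subroute2):
--                 return new_subroute1, new_subroute2
--     return subroute1, subroute2
--
-- def is_feasible(subroute):
--     return subroute[0] == subroute[-1] == 0
-- ===== SOURCE B (Python) =====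
-- def two_opt_swap(subroute1, subroute2):
--     s1, s2 = subroute1, subroute2
--     if not s1 or not s2 or s1[-1] != 0 or s2[-1] != 0:
--         return s1, s2
--     if len(s2) >= 2 and s2[0] == 0:
--         j = 1 + s2[1:].index(0)   # exists: s2 ends in 0
--         return s2[j:], s2[:j] + s1
--     if len(s1) >= 2 and s1[0] == 0:
--         i = 1 + s1[1:].index(0)   # exists: s1 ends in 0
--         return s1[:i] + s2, s1[i:]
--     return s1, s2
-- ===== Notes on version B (the rewrite author's own statement) =====
-- stated objective: faster
-- what changed: A tries every (i,j) cut pair, rebuilding and testing four slices per pair (O(n^3)); B observes that feasibility only depends on the boundary elements of the two subroutes, so it decides everything from the first/last elements and at most one linear scan for the first zero, building the result slices once (O(n)).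
import Mathlib
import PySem

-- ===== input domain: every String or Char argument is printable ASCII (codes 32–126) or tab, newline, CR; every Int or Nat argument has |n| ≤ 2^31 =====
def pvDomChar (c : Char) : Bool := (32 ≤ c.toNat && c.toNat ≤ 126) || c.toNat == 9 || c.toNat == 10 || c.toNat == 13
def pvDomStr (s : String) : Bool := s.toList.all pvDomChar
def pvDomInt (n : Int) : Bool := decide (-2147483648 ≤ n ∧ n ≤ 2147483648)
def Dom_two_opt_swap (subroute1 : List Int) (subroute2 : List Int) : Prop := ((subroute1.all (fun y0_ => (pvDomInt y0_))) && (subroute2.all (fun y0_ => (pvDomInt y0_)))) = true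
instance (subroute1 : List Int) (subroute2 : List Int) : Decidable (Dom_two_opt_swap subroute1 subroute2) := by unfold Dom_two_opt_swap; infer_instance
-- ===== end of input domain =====

-- B replaces A's O(n^3) triple nested scan (all (i,j) cuts, each rebuilding and testing full slices)
-- by an O(n) closed-form case analysis on the boundary elements, with at most one linear index scan.

-- ===== PORT A =====
-- is_feasible(sub): sub[0] == sub[-1] == 0; exact on the nonempty lists A calls it on
-- (A only calls it on concatenations containing a nonempty slice, so no IndexError arises).
def is_feasible (sub : List Int) : Bool :=
  PySem.List.pyGet? sub 0 == some 0 && PySem.List.pyGet? sub (-1) == some 0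

-- inner 'for j in range(len(subroute2))' with 'continue' and early return
def two_opt_loopJ (s1 s2 : List Int) (i : Int) : List Int → Option (List Int × List Int)
  | [] => none
  | j :: js =>
    if i == 0 && j == 0 then two_opt_loopJ s1 s2 i js
    else
      let new1 := PySem.List.slice s1 none (some i) ++ PySem.List.slice s2 (some j) none
      let new2 := PySem.List.slice s2 none (some j) ++ PySem.List.slice s1 (some i) none
      if is_feasible new1 && is_feasible new2 then some (new1, new2)
      else two_opt_loopJ s1 s2 i js

-- outer 'for i in range(len(subroute1))'
def two_opt_loopI (s1 s2 : List Int) : List Int → Option (List Int × List Int)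
  | [] => none
  | i :: is' =>
    match two_opt_loopJ s1 s2 i (PySem.List.pyRange 0 s2.length 1) with
    | some r => some r
    | none => two_opt_loopI s1 s2 is'

def two_opt_swap (subroute1 : List Int) (subroute2 : List Int) : List Int × List Int :=
  (two_opt_loopI subroute1 subroute2
      (PySem.List.pyRange 0 subroute1.length 1)).getD (subroute1, subroute2)

-- ===== PORT B =====
-- 1 + s2[1:].index(0); the .index call always succeeds at B's call sites (the list ends in 0),
-- so the .getD 0 default is unreachable.
def two_opt_firstCut (s : List Int) : Int :=
  1 + ((PySem.List.index? (PySem.List.slice s (some 1) none) 0).getD 0 : Nat)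

def two_opt_swap_alt (subroute1 : List Int) (subroute2 : List Int) : List Int × List Int :=
  if subroute1.isEmpty || subroute2.isEmpty
      || !(PySem.List.pyGet? subroute1 (-1) == some 0)
      || !(PySem.List.pyGet? subroute2 (-1) == some 0) then
    (subroute1, subroute2)
  else if 2 ≤ subroute2.length && PySem.List.pyGet? subroute2 0 == some 0 then
    let j := two_opt_firstCut subroute2
    (PySem.List.slice subroute2 (some j) none,
     PySem.List.slice subroute2 none (some j) ++ subroute1)
  else if 2 ≤ subroute1.length && PySem.List.pyGet? subroute1 0 == some 0 then
    let i := two_opt_firstCut subroute1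
    (PySem.List.slice subroute1 none (some i) ++ subroute2,
     PySem.List.slice subroute1 (some i) none)
  else
    (subroute1, subroute2)

-- ===== PRECONDITION & SPEC =====
def Spec_two_opt_swap (subroute1 : List Int) (subroute2 : List Int) (out : List Int × List Int) : Prop := out = two_opt_swap_alt subroute1 subroute2
instance (subroute1 : List Int) (subroute2 : List Int) (out : List Int × List Int) : Decidable (Spec_two_opt_swap subroute1 subroute2 out) := by unfold Spec_two_opt_swap; infer_instance

-- ===== CLAIM (what is proved, stated in full; the proofs are below) =====
def Claim_equal_two_opt_swap : Prop := ∀ (subroute1 : List Int) (subroute2 : List Int), Dom_two_opt_swap subroute1 subroute2 → Spec_two_opt_swap subroute1 subroute2 (two_opt_swap subroute1 subroute2)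

-- ===== LEMMAS AND PROOFS =====

-- the feasibility test of the (i,j) cut, and the pair A would return there
def condA (s1 s2 : List Int) (i j : Int) : Bool :=
  is_feasible (PySem.List.slice s1 none (some i) ++ PySem.List.slice s2 (some j) none) &&
  is_feasible (PySem.List.slice s2 none (some j) ++ PySem.List.slice s1 (some i) none)

def pairA (s1 s2 : List Int) (i j : Int) : List Int × List Int :=
  (PySem.List.slice s1 none (some i) ++ PySem.List.slice s2 (some j) none,
   PySem.List.slice s2 none (some j) ++ PySem.List.slice s1 (some i) none)

theorem loopJ_eq_find (s1 s2 : List Int) (i : Int) (js : List Int) :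
    two_opt_loopJ s1 s2 i js =
      (js.find? (fun j => !(i == 0 && j == 0) && condA s1 s2 i j)).map (fun j => pairA s1 s2 i j) := by
  induction js with
  | nil => rfl
  | cons j js ih =>
    simp only [two_opt_loopJ, List.find?]
    by_cases h : (i == 0 && j == 0) = true
    · simp [h, ih]
    · have hc' : (is_feasible (PySem.List.slice s1 none (some i) ++ PySem.List.slice s2 (some j) none) &&
          is_feasible (PySem.List.slice s2 none (some j) ++ PySem.List.slice s1 (some i) none))
          = condA s1 s2 i j := rfl
      simp only [h, Bool.not_false, Bool.true_and, Bool.false_eq_true, if_false, hc']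
      by_cases hc : condA s1 s2 i j = true
      · simp [hc, pairA]
      · simp [hc, ih]

theorem loopI_eq_findSome (s1 s2 : List Int) (is' : List Int) :
    two_opt_loopI s1 s2 is' =
      is'.findSome? (fun i => two_opt_loopJ s1 s2 i (PySem.List.pyRange 0 s2.length 1)) := by
  induction is' with
  | nil => rfl
  | cons i is' ih =>
    simp only [two_opt_loopI, List.findSome?]
    cases two_opt_loopJ s1 s2 i (PySem.List.pyRange 0 s2.length 1) <;> simp [ih]

-- generic list lemmas
theorem findSome?_eq_map_find? {α β : Type} {g : α → Option β} {p : α → Bool} {f : α → β} {l : List α}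
    (h : ∀ x ∈ l, g x = if p x then some (f x) else none) :
    l.findSome? g = (l.find? p).map f := by
  induction l with
  | nil => rfl
  | cons x l ih =>
    simp only [List.findSome?, List.find?]
    rw [h x (by simp)]
    by_cases hp : p x = true
    · simp [hp]
    · simp only [hp, if_false, Bool.false_eq_true]
      simp only [Bool.not_eq_true] at hp
      simp [ih (fun y hy => h y (by simp [hy]))]

theorem findSome?_eq_none {α β : Type} {g : α → Option β} {l : List α}
    (h : ∀ x ∈ l, g x = none) : l.findSome? g = none := by
  induction l with
  | nil => rfl
  | cons x l ih =>
    simp only [List.findSome?]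
    rw [h x (by simp)]
    exact ih (fun y hy => h y (by simp [hy]))

theorem find?_pyRange_eq_some {p : Int → Bool} {a b m : Int}
    (ham : a ≤ m) (hmb : m < b) (hm : p m = true)
    (hlt : ∀ x, a ≤ x → x < m → p x = false) :
    (PySem.List.pyRange a b 1).find? p = some m := by
  induction hn : (m - a).toNat generalizing a with
  | zero =>
    have : a = m := by omega
    subst this
    rw [PySem.List.pyRange_one_cons (lt_of_le_of_lt ham hmb)]
    simp [List.find?, hm]
  | succ n ih =>
    have ham' : a < m := by omega
    rw [PySem.List.pyRange_one_cons (lt_trans ham' hmb)]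
    simp only [List.find?]
    rw [hlt a le_rfl ham']
    exact ih (by omega) (fun x hx => hlt x (by omega)) (by omega)

theorem find?_pyRange_eq_none {p : Int → Bool} {a b : Int}
    (h : ∀ x, a ≤ x → x < b → p x = false) :
    (PySem.List.pyRange a b 1).find? p = none := by
  induction hn : (b - a).toNat generalizing a with
  | zero =>
    rw [PySem.List.pyRange_one_eq_nil (by omega)]
    rfl
  | succ n ih =>
    have hab : a < b := by omega
    rw [PySem.List.pyRange_one_cons hab]
    simp only [List.find?]
    rw [h a le_rfl hab]
    exact ih (fun x hx => h x (by omega)) (by omega)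


theorem head?_append_left {α : Type} (l1 l2 : List α) (h : l1 ≠ []) :
    (l1 ++ l2).head? = l1.head? := by
  cases l1 with
  | nil => simp at h
  | cons a as => simp

theorem head?_take_pos {α : Type} (l : List α) (n : Nat) (hn : 0 < n) :
    (l.take n).head? = l.head? := by
  cases l with
  | nil => simp
  | cons a as => cases n with
    | zero => omega
    | succ m => simp

theorem getLast?_drop_lt {α : Type} (l : List α) (n : Nat) (h : n < l.length) :
    (l.drop n).getLast? = l.getLast? := by
  have hne : l.drop n ≠ [] := by
    simp only [ne_eq, List.drop_eq_nil_iff]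
    omega
  conv_rhs => rw [← List.take_append_drop n l]
  rw [List.getLast?_append_of_ne_nil _ hne]

theorem head?_take_append_drop {α : Type} (l1 l2 : List α) (n m : Nat)
    (h1 : l1 ≠ []) : (l1.take n ++ l2.drop m).head? = if n = 0 then l2[m]? else l1.head? := by
  cases n with
  | zero => simp [List.head?_drop]
  | succ p =>
    rw [if_neg (by omega), head?_append_left, head?_take_pos l1 (p + 1) (by omega)]
    cases l1 with
    | nil => simp at h1
    | cons c cs => simp

theorem condA_eval (s1 s2 : List Int) (i j : Int) (hi0 : 0 ≤ i) (hi : i < s1.length)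
    (hj0 : 0 ≤ j) (hj : j < s2.length) :
    condA s1 s2 i j =
      ((if i = 0 then s2[j.toNat]? == some 0 else s1.head? == some 0) &&
       (s2.getLast? == some 0) &&
       ((if j = 0 then s1[i.toNat]? == some 0 else s2.head? == some 0) &&
        (s1.getLast? == some 0))) := by
  have hs1 : s1 ≠ [] := by cases s1 <;> simp_all; omega
  have hs2 : s2 ≠ [] := by cases s2 <;> simp_all; omega
  have hd2 : s2.drop j.toNat ≠ [] := by
    simp only [ne_eq, List.drop_eq_nil_iff]
    omega
  have hd1 : s1.drop i.toNat ≠ [] := by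
    simp only [ne_eq, List.drop_eq_nil_iff]
    omega
  have hii : i.toNat = 0 ↔ i = 0 := by omega
  have hjj : j.toNat = 0 ↔ j = 0 := by omega
  rw [condA, is_feasible, is_feasible,
    PySem.List.slice_to s1 hi0, PySem.List.slice_from s2 hj0,
    PySem.List.slice_to s2 hj0, PySem.List.slice_from s1 hi0,
    PySem.List.pyGet?_zero, PySem.List.pyGet?_zero,
    PySem.List.pyGet?_neg_one, PySem.List.pyGet?_neg_one,
    List.getLast?_append_of_ne_nil _ hd2, List.getLast?_append_of_ne_nil _ hd1,
    getLast?_drop_lt s2 j.toNat (by omega), getLast?_drop_lt s1 i.toNat (by omega),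
    ← List.head?_eq_getElem?, ← List.head?_eq_getElem?,
    head?_take_append_drop s1 s2 i.toNat j.toNat hs1,
    head?_take_append_drop s2 s1 j.toNat i.toNat hs2]
  by_cases hi' : i = 0 <;> by_cases hj' : j = 0 <;> simp [hi', hj', hii, hjj]


theorem loopJ_at_zero_some (s1 : List Int) (b : Int) (bs : List Int) (k : Nat)
    (hs1 : s1 ≠ []) (hb : b = 0) (hk : PySem.List.index? bs 0 = some k)
    (hL1 : s1.getLast? = some 0) (hL2 : (b :: bs).getLast? = some 0) :
    two_opt_loopJ s1 (b :: bs) 0 (PySem.List.pyRange 0 (b :: bs).length 1) =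
      some (pairA s1 (b :: bs) 0 (1 + (k : Int))) := by
  subst hb
  obtain ⟨hkl, hbk, hmin⟩ := PySem.List.getElem_of_index?_eq_some hk
  have hlen1 : (0 : Int) < s1.length := by
    have := List.length_pos_iff.mpr hs1
    omega
  rw [loopJ_eq_find, find?_pyRange_eq_some (a := 0) (m := 1 + (k : Int)) (by omega)
    (by simp only [List.length_cons]; push_cast; omega) ?_ ?_]
  · rfl
  · have ht : (1 + (k : Int)).toNat = k + 1 := by omega
    rw [condA_eval _ _ _ _ le_rfl hlen1 (by omega)
      (by simp only [List.length_cons]; push_cast; omega)]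
    simp [ht, hL1, hL2, List.getElem?_eq_getElem hkl, hbk, show (1 : Int) + k ≠ 0 by omega]
  · intro x hx0 hx
    by_cases hx' : x = 0
    · subst hx'
      simp
    · have hxk : x.toNat - 1 < k := by omega
      have hxb : x.toNat - 1 < bs.length := by omega
      have ht : x.toNat = (x.toNat - 1) + 1 := by omega
      rw [condA_eval _ _ _ _ le_rfl hlen1 hx0
        (by simp only [List.length_cons]; push_cast; omega)]
      rw [if_pos rfl, ht]
      simp [List.getElem?_eq_getElem hxb, hmin _ hxk]

-- i = 0 row finds nothing when s2 offers no feasible cut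
theorem loopJ_at_zero_none (s1 : List Int) (b : Int) (bs : List Int)
    (hs1 : s1 ≠ []) (hC : b ≠ 0 ∨ bs = []) :
    two_opt_loopJ s1 (b :: bs) 0 (PySem.List.pyRange 0 (b :: bs).length 1) = none := by
  have hlen1 : (0 : Int) < s1.length := by
    have := List.length_pos_iff.mpr hs1
    omega
  rw [loopJ_eq_find, find?_pyRange_eq_none ?_]
  · rfl
  · intro x hx0 hx
    by_cases hx' : x = 0
    · subst hx'
      simp
    · have hbs : bs ≠ [] := by
        intro h
        subst h
        simp at hx
        omega
      have hb : b ≠ 0 := hC.resolve_right hbs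
      rw [condA_eval _ _ _ _ le_rfl hlen1 hx0 hx]
      rw [if_pos rfl, if_neg hx']
      simp [hb]

-- i ≥ 1 row with s1 starting at 0: cut at j = 0 iff s1[i] = 0
theorem loopJ_at_pos_some (a : Int) (as : List Int) (s2 : List Int) (i : Int)
    (hi1 : 1 ≤ i) (hi : i < (a :: as).length) (hs2 : s2 ≠ [])
    (ha : a = 0) (hL1 : (a :: as).getLast? = some 0) (hL2 : s2.getLast? = some 0)
    (hz : (a :: as)[i.toNat]? = some 0) :
    two_opt_loopJ (a :: as) s2 i (PySem.List.pyRange 0 s2.length 1) =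
      some (pairA (a :: as) s2 i 0) := by
  subst ha
  have hlen2 : (0 : Int) < s2.length := by
    have := List.length_pos_iff.mpr hs2
    omega
  rw [loopJ_eq_find, find?_pyRange_eq_some (a := 0) (m := 0) le_rfl hlen2 ?_ (by omega)]
  · rfl
  · rw [condA_eval _ _ _ _ (by omega) hi le_rfl hlen2]
    rw [if_neg (by omega), if_pos rfl]
    simp [hz, hL1, hL2, show i ≠ 0 by omega]

-- i ≥ 1 row finds nothing when s1[i] ≠ 0 and s2 offers no inner cut
theorem loopJ_at_pos_none (a : Int) (as : List Int) (b : Int) (bs : List Int) (i : Int)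
    (hi1 : 1 ≤ i) (hi : i < (a :: as).length)
    (hC : b ≠ 0 ∨ bs = []) (hz : (a :: as)[i.toNat]? ≠ some 0 ∨ a ≠ 0) :
    two_opt_loopJ (a :: as) (b :: bs) i (PySem.List.pyRange 0 (b :: bs).length 1) = none := by
  rw [loopJ_eq_find, find?_pyRange_eq_none ?_]
  · rfl
  · intro x hx0 hx
    rw [condA_eval _ _ _ _ (by omega) hi hx0 hx]
    rw [if_neg (by omega)]
    rcases hz with hz | hz
    · by_cases hx' : x = 0
      · subst hx'
        rw [if_pos rfl]
        simp only [List.head?_cons]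
        cases hv : (a :: as)[i.toNat]? with
        | none => simp
        | some v =>
          rw [hv] at hz
          have : v ≠ 0 := fun h => hz (by rw [h])
          simp [this]
      · have hbs : bs ≠ [] := by
          intro h
          subst h
          simp at hx
          omega
        have hb : b ≠ 0 := hC.resolve_right hbs
        rw [if_neg hx']
        simp [hb]
    · simp [hz]


theorem getLast?_cons_of_ne_nil {α : Type} (x : α) (xs : List α) (h : xs ≠ []) :
    (x :: xs).getLast? = xs.getLast? := by
  rw [List.getLast?_cons]
  cases xs with
  | nil => simp at h
  | cons y ys => simp [List.getLast?_cons]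

-- no cut is feasible unless both subroutes end in the depot 0
theorem loopJ_none_bad (s1 s2 : List Int) (i : Int) (hi0 : 0 ≤ i) (hi : i < s1.length)
    (hbad : s1.getLast? ≠ some 0 ∨ s2.getLast? ≠ some 0) :
    two_opt_loopJ s1 s2 i (PySem.List.pyRange 0 s2.length 1) = none := by
  rw [loopJ_eq_find, find?_pyRange_eq_none ?_]
  · rfl
  · intro x hx0 hx
    rw [condA_eval _ _ _ _ hi0 hi hx0 hx]
    rcases hbad with h | h
    · have hf : (s1.getLast? == some 0) = false := beq_eq_false_iff_ne.mpr h
      simp [hf]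
    · have hf : (s2.getLast? == some 0) = false := beq_eq_false_iff_ne.mpr h
      simp [hf]

theorem main_bad (a b : Int) (as bs : List Int)
    (hbad : (a :: as).getLast? ≠ some 0 ∨ (b :: bs).getLast? ≠ some 0) :
    two_opt_swap (a :: as) (b :: bs) = two_opt_swap_alt (a :: as) (b :: bs) := by
  rw [two_opt_swap, loopI_eq_findSome, findSome?_eq_none (fun i hi => ?_)]
  · rcases hbad with h | h <;>
      simp [two_opt_swap_alt, PySem.List.pyGet?_neg_one, h]
  · obtain ⟨h0, hlt⟩ := PySem.List.mem_pyRange_one.mp hi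
    exact loopJ_none_bad _ _ i h0 hlt hbad

-- ===== VERDICT (by name: the statement is the Claim_ definition above) =====
theorem two_opt_swap_spec : Claim_equal_two_opt_swap := by
  unfold Claim_equal_two_opt_swap Spec_two_opt_swap
  intro s1 s2 _
  rcases s1 with _ | ⟨a, as⟩
  · rw [two_opt_swap]
    rw [show (PySem.List.pyRange 0 (List.length ([] : List Int)) 1) = [] from
      PySem.List.pyRange_one_eq_nil (by simp)]
    simp [two_opt_loopI, two_opt_swap_alt]
  · rcases s2 with _ | ⟨b, bs⟩
    · have hJ : ∀ is', two_opt_loopI (a :: as) [] is' = none := by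
        intro is'
        induction is' with
        | nil => rfl
        | cons i is ih =>
          rw [two_opt_loopI,
            show (PySem.List.pyRange 0 (List.length ([] : List Int)) 1) = [] from
              PySem.List.pyRange_one_eq_nil (by simp), ih]
          rfl
      simp [two_opt_swap, two_opt_swap_alt, hJ]
    · by_cases hL1 : (a :: as).getLast? = some 0
      · by_cases hL2 : (b :: bs).getLast? = some 0
        · by_cases hC1 : b = 0 ∧ bs ≠ []
          · obtain ⟨hb, hbs⟩ := hC1
            have h0bs : (0 : Int) ∈ bs := List.mem_of_getLast?
              (by rw [← getLast?_cons_of_ne_nil b bs hbs]; exact hL2)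
            obtain ⟨k, hk⟩ := Option.isSome_iff_exists.mp
              ((PySem.List.index?_isSome_iff bs 0).mpr h0bs)
            have hbl : 1 ≤ bs.length := List.length_pos_iff.mpr hbs
            rw [two_opt_swap, PySem.List.pyRange_one_cons
              (by simp only [List.length_cons]; push_cast; omega)]
            simp only [two_opt_loopI]
            rw [loopJ_at_zero_some (a :: as) b bs k (by simp) hb hk hL1 hL2]
            have hg1 : ((a :: as).isEmpty || (b :: bs).isEmpty
                || !(PySem.List.pyGet? (a :: as) (-1) == some 0)
                || !(PySem.List.pyGet? (b :: bs) (-1) == some 0)) = false := by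
              simp [PySem.List.pyGet?_neg_one, hL1, hL2]
            have hg2 : (decide (2 ≤ (b :: bs).length)
                && (PySem.List.pyGet? (b :: bs) 0 == some 0)) = true := by
              simp [hb]
              omega
            rw [two_opt_swap_alt, if_neg (by rw [hg1]; simp), if_pos (by rw [hg2])]
            rw [two_opt_firstCut, PySem.List.slice_from_one]
            simp only [List.tail_cons, hk, Option.getD]
            rw [pairA, PySem.List.slice_to (a :: as) (le_refl 0),
              PySem.List.slice_from (a :: as) (le_refl 0)]
            simp
          · have hCb : b ≠ 0 ∨ bs = [] := by
              by_cases h : bs = []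
              · exact Or.inr h
              · exact Or.inl (fun hb0 => hC1 ⟨hb0, h⟩)
            have hg1 : ((a :: as).isEmpty || (b :: bs).isEmpty
                || !(PySem.List.pyGet? (a :: as) (-1) == some 0)
                || !(PySem.List.pyGet? (b :: bs) (-1) == some 0)) = false := by
              simp [PySem.List.pyGet?_neg_one, hL1, hL2]
            have hg2 : (decide (2 ≤ (b :: bs).length)
                && (PySem.List.pyGet? (b :: bs) 0 == some 0)) = false := by
              rcases hCb with h | h
              · simp [h]
              · subst h
                simp
            by_cases hC2 : a = 0 ∧ as ≠ []
            · obtain ⟨ha, has⟩ := hC2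
              have h0as : (0 : Int) ∈ as := List.mem_of_getLast?
                (by rw [← getLast?_cons_of_ne_nil a as has]; exact hL1)
              obtain ⟨k, hk⟩ := Option.isSome_iff_exists.mp
                ((PySem.List.index?_isSome_iff as 0).mpr h0as)
              obtain ⟨hkl, hak, hmin⟩ := PySem.List.getElem_of_index?_eq_some hk
              rw [two_opt_swap, PySem.List.pyRange_one_cons
                (by simp only [List.length_cons]; push_cast; omega)]
              simp only [two_opt_loopI]
              rw [loopJ_at_zero_none (a :: as) b bs (by simp) hCb,
                loopI_eq_findSome,
                findSome?_eq_map_find? (p := fun i => ((a :: as)[i.toNat]? == some 0))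
                  (f := fun i => pairA (a :: as) (b :: bs) i 0) ?_,
                find?_pyRange_eq_some (m := 1 + (k : Int)) (by omega)
                  (by simp only [List.length_cons]; push_cast; omega) ?_ ?_]
              · have hg3 : (decide (2 ≤ (a :: as).length)
                    && (PySem.List.pyGet? (a :: as) 0 == some 0)) = true := by
                  have := List.length_pos_iff.mpr has
                  simp [ha]
                  omega
                rw [two_opt_swap_alt, if_neg (by rw [hg1]; simp),
                  if_neg (by rw [hg2]; simp), if_pos (by rw [hg3])]
                rw [two_opt_firstCut, PySem.List.slice_from_one]
                simp only [List.tail_cons, hk, Option.getD]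
                simp [pairA, PySem.List.slice_to (b :: bs) (le_refl 0),
                  PySem.List.slice_from (b :: bs) (le_refl 0)]
              · have ht : (1 + (k : Int)).toNat = k + 1 := by omega
                simp [ht, List.getElem?_eq_getElem hkl, hak]
              · intro x hx1 hxk
                have hxk' : x.toNat - 1 < k := by omega
                have hxa : x.toNat - 1 < as.length := by omega
                have ht : x.toNat = (x.toNat - 1) + 1 := by omega
                rw [ht]
                simp [List.getElem?_eq_getElem hxa, hmin _ hxk']
              · intro i hi
                obtain ⟨h1i, hiN⟩ := PySem.List.mem_pyRange_one.mp hi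
                by_cases hz : (a :: as)[i.toNat]? = some 0
                · rw [if_pos (by simp [hz]),
                    loopJ_at_pos_some a as (b :: bs) i (by omega) hiN (by simp) ha hL1 hL2 hz]
                · rw [if_neg (by simp [hz]),
                    loopJ_at_pos_none a as b bs i (by omega) hiN hCb (Or.inl hz)]
            · rw [two_opt_swap, loopI_eq_findSome, findSome?_eq_none ?_]
              · have hg3 : (decide (2 ≤ (a :: as).length)
                    && (PySem.List.pyGet? (a :: as) 0 == some 0)) = false := by
                  by_cases h : as = []
                  · subst h
                    simp
                  · have ha : a ≠ 0 := fun h0 => hC2 ⟨h0, h⟩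
                    simp [ha]
                rw [two_opt_swap_alt, if_neg (by rw [hg1]; simp),
                  if_neg (by rw [hg2]; simp), if_neg (by rw [hg3]; simp)]
                rfl
              · intro i hi
                obtain ⟨h0i, hiN⟩ := PySem.List.mem_pyRange_one.mp hi
                by_cases hi0 : i = 0
                · subst hi0
                  exact loopJ_at_zero_none _ b bs (by simp) hCb
                · have has : as ≠ [] := by
                    intro h
                    subst h
                    simp at hiN
                    omega
                  have ha : a ≠ 0 := fun h => hC2 ⟨h, has⟩
                  exact loopJ_at_pos_none a as b bs i (by omega) hiN hCb (Or.inr ha)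
        · exact main_bad a b as bs (Or.inr hL2)
      · exact main_bad a b as bs (Or.inl hL1)
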